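-- pv_equiv track=rewrite | github.com/hansweytjens/neurosymbolic_test | check_declare_violations.py | check_altprecedence
-- ===== SOURCE A (Python) =====
-- def check_altprecedence(seq, A, B, **_):
--     last_A = last_B = -1
--     for i, act in enumerate(seq):
--         if act == A:
--             last_A = i
--         elif act == B:
--             if last_A <= last_B:
--                 return True
--             last_B = i
--     return False
-- ===== SOURCE B (Python) =====
-- def _bisect_left(a, x):
--     # leftmost insertion point of x in sorted list a (hand-written, no imports)
--     lo, hi = 0, len(a)
--     while lo < hi:
--         mid = (lo + hi) // 2
--         if a[mid] < x:
--             lo = mid + 1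
--         else:
--             hi = mid
--     return lo
--
--
-- def check_altprecedence(seq, A, B, **_):
--     # Pass 1: collect the positions of A and of B (elif precedence: if A == B
--     # every occurrence counts as A and there are no B positions).
--     As = []
--     Bs = []
--     for i, act in enumerate(seq):
--         if act == A:
--             As.append(i)
--         elif act == B:
--             Bs.append(i)
--     # Pass 2: each B must have some A strictly between the previous B and it.
--     prev = -1
--     for b in Bs:
--         j = _bisect_left(As, b)          # As[:j] are the A positions < b
--         if j == 0 or As[j - 1] <= prev:  # no A position in (prev, b)
--             return True
--         prev = b
--     return False
-- ===== Notes on version B (the rewrite author's own statement) =====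
-- stated objective: alternative
-- what changed: Instead of one pass carrying two running registers (last_A, last_B) with an early return, B first collects the sorted lists of A-positions and B-positions and then checks each B-position by binary search for the largest A-position below it, comparing it with the previous B-position.
import Mathlib
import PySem

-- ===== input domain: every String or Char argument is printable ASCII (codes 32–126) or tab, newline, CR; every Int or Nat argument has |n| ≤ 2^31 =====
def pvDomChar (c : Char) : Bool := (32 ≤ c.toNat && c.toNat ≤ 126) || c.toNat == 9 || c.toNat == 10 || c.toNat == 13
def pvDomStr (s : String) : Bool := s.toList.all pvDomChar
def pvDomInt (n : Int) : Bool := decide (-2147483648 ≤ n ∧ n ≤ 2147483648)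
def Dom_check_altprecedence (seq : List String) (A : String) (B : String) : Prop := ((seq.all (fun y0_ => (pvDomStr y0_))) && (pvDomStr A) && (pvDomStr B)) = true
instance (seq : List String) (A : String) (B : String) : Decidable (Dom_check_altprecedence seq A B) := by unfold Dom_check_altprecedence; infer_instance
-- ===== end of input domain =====

-- B replaces A's single pass with two running registers by: collect the A- and
-- B-position lists, then per B-position a binary search for the largest
-- A-position below it (objective: alternative algorithm, not faster).

-- ===== PORT A =====
-- A's for-loop with early return: structural recursion over seq carrying
-- (i, last_A, last_B), branches in A's order (if act==A / elif act==B).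
def goA (A B : String) : List String → Int → Int → Int → Bool
  | [], _, _, _ => false
  | act :: rest, i, lastA, lastB =>
    if act = A then goA A B rest (i + 1) i lastB
    else if act = B then
      if lastA ≤ lastB then true else goA A B rest (i + 1) lastA i
    else goA A B rest (i + 1) lastA lastB

def check_altprecedence (seq : List String) (A : String) (B : String) : Bool :=
  goA A B seq 0 (-1) (-1)

-- ===== PORT B =====
-- pass 1 of Source B: the A-positions and B-positions of seq, in order
-- (elif precedence: when act == A == B only the A list gets the index).
def collectAB (A B : String) : List String → Int → List Int × List Int
  | [], _ => ([], [])
  | act :: rest, i =>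
    if act = A then (i :: (collectAB A B rest (i + 1)).1, (collectAB A B rest (i + 1)).2)
    else if act = B then ((collectAB A B rest (i + 1)).1, i :: (collectAB A B rest (i + 1)).2)
    else collectAB A B rest (i + 1)

-- _bisect_left of Source B; a[mid] is always in range so getD is exact, and
-- lo, hi, mid are nonnegative so Nat division matches Python's //.
def bisectGo (a : List Int) (x : Int) (lo hi : Nat) : Nat :=
  if _h : lo < hi then
    if a.getD ((lo + hi) / 2) 0 < x then bisectGo a x ((lo + hi) / 2 + 1) hi
    else bisectGo a x lo ((lo + hi) / 2)
  else lo
termination_by hi - lo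
decreasing_by all_goals omega

-- pass 2 of Source B: loop over the B-positions with prev
def loopB (as' : List Int) : List Int → Int → Bool
  | [], _ => false
  | b :: bs, prev =>
    let j := bisectGo as' b 0 as'.length
    if j = 0 ∨ as'.getD (j - 1) 0 ≤ prev then true else loopB as' bs b

def check_altprecedence_alt (seq : List String) (A : String) (B : String) : Bool :=
  let p := collectAB A B seq 0
  loopB p.1 p.2 (-1)

-- ===== PRECONDITION & SPEC =====
def Spec_check_altprecedence (seq : List String) (A : String) (B : String) (out : Bool) : Prop := out = check_altprecedence_alt seq A B
instance (seq : List String) (A : String) (B : String) (out : Bool) : Decidable (Spec_check_altprecedence seq A B out) := by unfold Spec_check_altprecedence; infer_instance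

-- ===== CLAIM (what is proved, stated in full; the proofs are below) =====
def Claim_equal_check_altprecedence : Prop := ∀ (seq : List String) (A : String) (B : String), Dom_check_altprecedence seq A B → Spec_check_altprecedence seq A B (check_altprecedence seq A B)

-- ===== LEMMAS AND PROOFS =====

-- reference loop: per B-position b, is there an A-position in (prev, b)?
def loopRef (as' : List Int) : List Int → Int → Bool
  | [], _ => false
  | b :: bs, prev =>
    if as'.any (fun a => decide (prev < a) && decide (a < b)) then loopRef as' bs b
    else true

-- all collected positions are ≥ the starting index
lemma collect_ge (A B : String) : ∀ (seq : List String) (i : Int),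
    (∀ a ∈ (collectAB A B seq i).1, i ≤ a) ∧ (∀ b ∈ (collectAB A B seq i).2, i ≤ b) := by
  intro seq
  induction seq with
  | nil => intro i; simp [collectAB]
  | cons act rest ih =>
    intro i
    have h := ih (i + 1)
    simp only [collectAB]
    split_ifs with h1 h2
    · refine ⟨?_, ?_⟩
      · intro a ha
        rcases List.mem_cons.mp ha with rfl | ha
        · omega
        · have := h.1 a ha; omega
      · intro b hb; have := h.2 b hb; omega
    · refine ⟨?_, ?_⟩
      · intro a ha; have := h.1 a ha; omega
      · intro b hb
        rcases List.mem_cons.mp hb with rfl | hb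
        · omega
        · have := h.2 b hb; omega
    · exact ⟨fun a ha => by have := h.1 a ha; omega,
             fun b hb => by have := h.2 b hb; omega⟩

-- the A-position list is strictly increasing
lemma collect_sorted (A B : String) : ∀ (seq : List String) (i : Int),
    (collectAB A B seq i).1.Pairwise (· < ·) := by
  intro seq
  induction seq with
  | nil => intro i; simp [collectAB]
  | cons act rest ih =>
    intro i
    have h := ih (i + 1)
    have hge := (collect_ge A B rest (i + 1)).1
    simp only [collectAB]
    split_ifs with h1 h2
    · exact List.Pairwise.cons (fun a ha => by have := hge a ha; omega) h
    · exact h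
    · exact h

-- A's loop equals the reference loop, with `pre` the A-positions already seen
lemma mainA (A B : String) : ∀ (seq : List String) (i lastA lastB : Int) (pre : List Int),
    0 ≤ i → lastA < i → lastB < i → -1 ≤ lastB → -1 ≤ lastA →
    (∀ a ∈ pre, a ≤ lastA) → (lastA = -1 ∨ lastA ∈ pre) →
    goA A B seq i lastA lastB =
      loopRef (pre ++ (collectAB A B seq i).1) (collectAB A B seq i).2 lastB := by
  intro seq
  induction seq with
  | nil =>
    intro i lastA lastB pre _ _ _ _ _ _ _
    simp only [goA, collectAB, List.append_nil, loopRef]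
  | cons act rest ih =>
    intro i lastA lastB pre hi hA hB hBm hAm hpre hmem
    have hge := collect_ge A B rest (i + 1)
    simp only [goA, collectAB]
    split_ifs with h1 h2 h3
    · -- act = A
      have step := ih (i + 1) i lastB (pre ++ [i]) (by omega) (by omega) (by omega) hBm (by omega)
        (by intro a ha
            rcases List.mem_append.mp ha with ha | ha
            · have := hpre a ha; omega
            · rcases List.mem_singleton.mp ha with rfl; omega)
        (Or.inr (List.mem_append_right _ (List.mem_singleton_self i)))
      rw [step, List.append_assoc, List.singleton_append]
    · -- act = B, last_A <= last_B : A returns True; ref finds no a in (lastB, i)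
      have hnone : (pre ++ (collectAB A B rest (i + 1)).1).any
          (fun a => decide (lastB < a) && decide (a < i)) = false := by
        simp only [List.any_eq_false]
        intro a ha
        rcases List.mem_append.mp ha with ha | ha
        · have := hpre a ha; simp only [Bool.and_eq_true, decide_eq_true_eq, not_and]; omega
        · have := hge.1 a ha; simp only [Bool.and_eq_true, decide_eq_true_eq, not_and]; omega
      simp [loopRef, hnone]
    · -- act = B, last_A > last_B : ref finds lastA; both recurse
      have hmemA : lastA ∈ pre := by
        rcases hmem with h | h
        · omega
        · exact h
      have hsome : (pre ++ (collectAB A B rest (i + 1)).1).any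
          (fun a => decide (lastB < a) && decide (a < i)) = true := by
        simp only [List.any_eq_true]
        exact ⟨lastA, List.mem_append_left _ hmemA,
          by simp only [Bool.and_eq_true, decide_eq_true_eq]; omega⟩
      simp only [loopRef, hsome, if_true]
      exact ih (i + 1) lastA i pre (by omega) (by omega) (by omega) (by omega) hAm hpre hmem
    · -- other activity
      exact ih (i + 1) lastA lastB pre (by omega) (by omega) (by omega) hBm hAm hpre hmem

-- binary-search invariant: bisectGo returns the split point of x in a sorted a
lemma bisect_inv (a : List Int) (x : Int)
    (mono : ∀ p q : Nat, p ≤ q → q < a.length → a.getD p 0 ≤ a.getD q 0) :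
    ∀ lo hi : Nat, lo ≤ hi → hi ≤ a.length →
    (∀ k, k < lo → a.getD k 0 < x) →
    (∀ k, hi ≤ k → k < a.length → x ≤ a.getD k 0) →
    bisectGo a x lo hi ≤ hi ∧
    (∀ k, k < bisectGo a x lo hi → a.getD k 0 < x) ∧
    (∀ k, bisectGo a x lo hi ≤ k → k < a.length → x ≤ a.getD k 0) := by
  intro lo hi
  induction hn : hi - lo using Nat.strong_induction_on generalizing lo hi with
  | _ n ihn =>
    intro hlh hhl hlow hhigh
    rw [bisectGo]
    split_ifs with h1 h2
    · -- a[mid] < x : recurse right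
      subst hn
      refine ihn (hi - ((lo + hi) / 2 + 1)) (by omega) ((lo + hi) / 2 + 1) hi rfl
        (by omega) hhl ?_ hhigh
      intro k hk
      by_cases hk2 : k < lo
      · exact hlow k hk2
      · have hm : a.getD k 0 ≤ a.getD ((lo + hi) / 2) 0 :=
          mono k ((lo + hi) / 2) (by omega) (by omega)
        omega
    · -- x ≤ a[mid] : recurse left
      subst hn
      have step := ihn ((lo + hi) / 2 - lo) (by omega) lo ((lo + hi) / 2) rfl
        (by omega) (by omega) hlow
        (by intro k hk hklen
            have hm : a.getD ((lo + hi) / 2) 0 ≤ a.getD k 0 := mono ((lo + hi) / 2) k hk hklen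
            omega)
      exact ⟨by omega, step.2.1, step.2.2⟩
    · exact ⟨by omega, hlow, fun k hk hk2 => hhigh k (by omega) hk2⟩

lemma pairwise_mono (a : List Int) (hs : a.Pairwise (· < ·)) :
    ∀ p q : Nat, p ≤ q → q < a.length → a.getD p 0 ≤ a.getD q 0 := by
  intro p q hpq hq
  rcases Nat.eq_or_lt_of_le hpq with rfl | hlt
  · exact le_refl _
  · have := List.pairwise_iff_getElem.mp hs p q (by omega) hq hlt
    rw [List.getD_eq_getElem _ _ (by omega), List.getD_eq_getElem _ _ hq]
    omega

lemma mem_getD (a : List Int) (y : Int) :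
    y ∈ a ↔ ∃ k : Nat, k < a.length ∧ a.getD k 0 = y := by
  constructor
  · intro hy
    obtain ⟨k, hk, hval⟩ := List.mem_iff_getElem.mp hy
    exact ⟨k, hk, by rw [List.getD_eq_getElem _ _ hk]; exact hval⟩
  · rintro ⟨k, hk, hval⟩
    rw [← hval, List.getD_eq_getElem _ _ hk]
    exact List.getElem_mem hk

-- Source B's per-B test via binary search matches the reference interval test
lemma step_eq (a : List Int) (hs : a.Pairwise (· < ·)) (b prev : Int) :
    (decide (bisectGo a b 0 a.length = 0 ∨ a.getD (bisectGo a b 0 a.length - 1) 0 ≤ prev)) =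
      !(a.any (fun x => decide (prev < x) && decide (x < b))) := by
  have mono := pairwise_mono a hs
  obtain ⟨hle, hlow, hhigh⟩ := bisect_inv a b mono 0 a.length (Nat.zero_le _) (le_refl _)
    (by intro k hk; omega) (by intro k hk hk2; omega)
  set j := bisectGo a b 0 a.length with hj
  by_cases hc : j = 0 ∨ a.getD (j - 1) 0 ≤ prev
  · have hnone : a.any (fun x => decide (prev < x) && decide (x < b)) = false := by
      simp only [List.any_eq_false]
      intro y hy
      obtain ⟨k, hk, hval⟩ := (mem_getD a y).mp hy
      simp only [Bool.and_eq_true, decide_eq_true_eq, not_and]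
      intro hpy
      rcases hc with hc | hc
      · have := hhigh k (by omega) hk; omega
      · by_cases hkj : k < j
        · have := mono k (j - 1) (by omega) (by omega); omega
        · have := hhigh k (by omega) hk; omega
    simp only [hnone, Bool.not_false, decide_eq_true_eq]
    exact hc
  · push Not at hc
    have hsome : a.any (fun x => decide (prev < x) && decide (x < b)) = true := by
      simp only [List.any_eq_true]
      refine ⟨a.getD (j - 1) 0, (mem_getD a _).mpr ⟨j - 1, by omega, rfl⟩, ?_⟩
      have := hlow (j - 1) (by omega)
      simp only [Bool.and_eq_true, decide_eq_true_eq]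
      exact ⟨hc.2, this⟩
    simp only [hsome, Bool.not_true, decide_eq_false_iff_not, not_or, not_le]
    exact hc

-- Source B's pass-2 loop equals the reference loop on a sorted A-list
lemma loopB_eq_ref (a : List Int) (hs : a.Pairwise (· < ·)) :
    ∀ (bs : List Int) (prev : Int), loopB a bs prev = loopRef a bs prev := by
  intro bs
  induction bs with
  | nil => intro prev; rfl
  | cons b t ih =>
    intro prev
    simp only [loopB, loopRef]
    have h := step_eq a hs b prev
    cases hany : a.any (fun x => decide (prev < x) && decide (x < b)) with
    | false =>
      rw [hany] at h
      simp only [Bool.not_false, decide_eq_true_eq] at h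
      rw [if_pos h, if_neg (by simp)]
    | true =>
      rw [hany] at h
      simp only [Bool.not_true, decide_eq_false_iff_not] at h
      rw [if_neg h, if_pos rfl, ih]

-- ===== VERDICT (by name: the statement is the Claim_ definition above) =====
theorem check_altprecedence_spec : Claim_equal_check_altprecedence := by
  intro seq A B _
  unfold Spec_check_altprecedence check_altprecedence check_altprecedence_alt
  have h1 := mainA A B seq 0 (-1) (-1) [] (by omega) (by omega) (by omega) (by omega)
    (by omega) (by intro a ha; simp at ha) (Or.inl rfl)
  have h2 := loopB_eq_ref (collectAB A B seq 0).1 (collect_sorted A B seq 0)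
    (collectAB A B seq 0).2 (-1)
  simp only [List.nil_append] at h1
  rw [h1, h2]
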